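-- pv_equiv track=rewrite | github.com/Rickerd1234/Advent-of-Code | 2021/Day 25/25.py | stepGrid
-- ===== SOURCE A (Python) =====
-- def stepGrid(grid):
--     moved = False
--     w,h = len(grid[0]), len(grid)
--     getNewPos = lambda p, s: p % s
--     movers = []
--     for y,row in enumerate(grid):
--         for x,pos in enumerate(row):
--             if pos == ">":
--                 np = getNewPos(x + 1, w)
--                 if grid[y][np] == ".":
--                     movers.append((x,y, np, pos))
--
--     if len(movers) > 0: moved = True
--
--     for x,y,n,t in movers:
--         if t == ">":
--             grid[y][x], grid[y][n] = grid[y][n], grid[y][x]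
--
--     movers = []
--     for y,row in enumerate(grid):
--         for x,pos in enumerate(row):
--             if pos == "v":
--                 np = getNewPos(y + 1, h)
--                 if grid[np][x] == ".":
--                     movers.append((x,y, np, pos))
--
--     if len(movers) > 0: moved = True
--
--     for x,y,n,t in movers:
--         if t == "v":
--             grid[y][x], grid[n][x] = grid[n][x], grid[y][x]
--
--     return moved
-- ===== SOURCE B (Python) =====
-- def stepGrid(grid):
--     # Pull-based step: build each phase's new cell values from neighbours, then write
--     # them back into the existing row lists (same in-place mutation as the original).
--     h = len(grid)
--     moved = False
--     # east phase (row-local)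
--     for row in grid:
--         w = len(row)
--         new = [">" if c == "." and row[(x - 1) % w] == ">"
--                else "." if c == ">" and row[(x + 1) % w] == "."
--                else c
--                for x, c in enumerate(row)]
--         if new != row:
--             moved = True
--         row[:] = new
--     # south phase (column-local): compute all rows from the post-east grid, then write back
--     new_rows = [["v" if c == "." and grid[(y - 1) % h][x] == "v"
--                  else "." if c == "v" and grid[(y + 1) % h][x] == "."
--                  else c
--                  for x, c in enumerate(row)]
--                 for y, row in enumerate(grid)]
--     for row, new in zip(grid, new_rows):
--         if new != row:
--             moved = True
--         row[:] = new
--     return moved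
-- ===== Notes on version B (the rewrite author's own statement) =====
-- stated objective: alternative
-- what changed: Replaces A's push-based strategy (collect a movers list over the whole grid, then mutate by swapping each mover with its target) by a pull-based one: each phase recomputes every cell's new value from its cyclic neighbours in one comprehension and detects movement by comparing the new rows with the old ones, so no movers list and no swap loop exist.
-- outside the precondition, e.g. on stepGrid([['x'], ['.', '>']]): A returns True, B raises IndexError
import Mathlib
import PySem

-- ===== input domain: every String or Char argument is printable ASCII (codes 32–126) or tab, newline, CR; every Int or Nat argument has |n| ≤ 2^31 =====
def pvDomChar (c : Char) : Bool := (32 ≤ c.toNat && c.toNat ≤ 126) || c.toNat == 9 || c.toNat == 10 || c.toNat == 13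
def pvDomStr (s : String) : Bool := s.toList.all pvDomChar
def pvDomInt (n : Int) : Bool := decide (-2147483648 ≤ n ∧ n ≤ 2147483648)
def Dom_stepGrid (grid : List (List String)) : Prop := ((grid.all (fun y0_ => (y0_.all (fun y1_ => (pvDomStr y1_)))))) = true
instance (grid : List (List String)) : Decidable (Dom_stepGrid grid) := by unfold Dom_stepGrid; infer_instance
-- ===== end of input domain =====

-- B replaces A's push strategy (collect a movers list, then swap each mover with its target)
-- by a pull strategy (recompute every cell from its cyclic neighbours, detect movement by
-- comparing rows); both Pythons mutate the argument's row lists identically — the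
-- equivalence proved here is about the RETURN value.

-- ===== PORT A =====
-- grid[y][x] read; exact for the in-bounds indices A uses (Pre_ keeps the grid rectangular & nonempty)
def pvGet (g : List (List String)) (y x : Int) : String :=
  (PySem.List.pyGet? ((PySem.List.pyGet? g y).getD []) x).getD ""

-- grid[y][x] = v (functional update of the row object; exact for the in-bounds indices A uses)
def pvSet (g : List (List String)) (y x : Int) (v : String) : List (List String) :=
  PySem.List.pySetD g y (PySem.List.pySetD ((PySem.List.pyGet? g y).getD []) x v)

-- Python's  g[y1][x1], g[y2][x2] = g[y2][x2], g[y1][x1]  (RHS evaluated first, assigned left to right)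
def pvSwap (g : List (List String)) (y1 x1 y2 x2 : Int) : List (List String) :=
  let a := pvGet g y2 x2
  let b := pvGet g y1 x1
  pvSet (pvSet g y1 x1 a) y2 x2 b

def stepGrid (grid : List (List String)) : Bool :=
  let w : Int := ((PySem.List.pyGet? grid 0).getD []).length
  let h : Int := grid.length
  let movers1 : List (Int × Int × Int × String) :=
    (PySem.List.enumerate grid).foldl (fun acc yr =>
      (PySem.List.enumerate yr.2).foldl (fun acc2 xp =>
        if xp.2 = ">" then
          let np := PySem.Int.mod (xp.1 + 1) w
          if pvGet grid yr.1 np = "." then acc2 ++ [(xp.1, yr.1, np, xp.2)] else acc2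
        else acc2) acc) []
  let moved := decide (0 < movers1.length)
  let grid1 := movers1.foldl (fun g m =>
      if m.2.2.2 = ">" then pvSwap g m.2.1 m.1 m.2.1 m.2.2.1 else g) grid
  let movers2 : List (Int × Int × Int × String) :=
    (PySem.List.enumerate grid1).foldl (fun acc yr =>
      (PySem.List.enumerate yr.2).foldl (fun acc2 xp =>
        if xp.2 = "v" then
          let np := PySem.Int.mod (yr.1 + 1) h
          if pvGet grid1 np xp.1 = "." then acc2 ++ [(xp.1, yr.1, np, xp.2)] else acc2
        else acc2) acc) []
  let moved := moved || decide (0 < movers2.length)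
  -- the final swap loop only mutates the grid; it cannot affect the returned flag
  let _grid2 := movers2.foldl (fun g m =>
      if m.2.2.2 = "v" then pvSwap g m.2.1 m.1 m.2.2.1 m.1 else g) grid1
  moved

-- ===== PORT B =====
-- one row of the east phase: pull each cell's new value from its cyclic row neighbours
def pullEastRow (row : List String) : List String :=
  let w : Int := row.length
  (PySem.List.enumerate row).map (fun xc =>
    if xc.2 = "." ∧ (PySem.List.pyGet? row (PySem.Int.mod (xc.1 - 1) w)).getD "" = ">" then ">"
    else if xc.2 = ">" ∧ (PySem.List.pyGet? row (PySem.Int.mod (xc.1 + 1) w)).getD "" = "." then "."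
    else xc.2)

def stepGrid_alt (grid : List (List String)) : Bool :=
  let h : Int := grid.length
  let east := grid.map pullEastRow
  let moved1 := (grid.zip east).any (fun rn => decide (rn.2 ≠ rn.1))
  let south := (PySem.List.enumerate east).map (fun yr =>
    (PySem.List.enumerate yr.2).map (fun xc =>
      if xc.2 = "." ∧ pvGet east (PySem.Int.mod (yr.1 - 1) h) xc.1 = "v" then "v"
      else if xc.2 = "v" ∧ pvGet east (PySem.Int.mod (yr.1 + 1) h) xc.1 = "." then "."
      else xc.2))
  moved1 || (east.zip south).any (fun rn => decide (rn.2 ≠ rn.1))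

-- ===== PRECONDITION & SPEC =====
-- Pre_ excludes the empty grid (A raises IndexError on grid[0]) and ragged grids containing a
-- ".", ">" or "v" cell: on those A indexes every row by the first row's width — raising
-- IndexError on many and returning an accidental value on the rest — while B's per-row /
-- per-column neighbour lookups may raise or disagree; ragged grids free of those three cell
-- values are harmless (no cucumber can exist or move) and stay admitted.
def Pre_stepGrid (grid : List (List String)) : Prop :=
  grid ≠ [] ∧ ((∀ row ∈ grid, row.length = (grid.headD []).length) ∨
    (∀ row ∈ grid, ∀ c ∈ row, c ≠ "." ∧ c ≠ ">" ∧ c ≠ "v"))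
instance (grid : List (List String)) : Decidable (Pre_stepGrid grid) := by
  unfold Pre_stepGrid; infer_instance

def pvWitness_stepGrid : List (List String) := [[">", ".", "."], [".", "v", "."]]

def Spec_stepGrid (grid : List (List String)) (out : Bool) : Prop := out = stepGrid_alt grid
instance (grid : List (List String)) (out : Bool) : Decidable (Spec_stepGrid grid out) := by unfold Spec_stepGrid; infer_instance

-- ===== CLAIM (what is proved, stated in full; the proofs are below) =====
def Claim_equal_stepGrid : Prop := ∀ (grid : List (List String)), Dom_stepGrid grid → Pre_stepGrid grid → Spec_stepGrid grid (stepGrid grid)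

-- ===== LEMMAS AND PROOFS =====

-- Nat-level cell access used by the proofs
def cg (g : List (List String)) (y x : Nat) : String := (g.getD y []).getD x ""
def cg2 (g : List (List String)) (c : Nat × Nat) : String := cg g c.1 c.2
def cset (g : List (List String)) (c : Nat × Nat) (v : String) : List (List String) :=
  g.set c.1 ((g.getD c.1 []).set c.2 v)
def cswap (g : List (List String)) (s t : Nat × Nat) : List (List String) :=
  cset (cset g s (cg2 g t)) t (cg2 g s)
def SameShape (s g : List (List String)) : Prop :=
  s.length = g.length ∧ ∀ i, (s.getD i []).length = (g.getD i []).length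
def InB (g : List (List String)) (c : Nat × Nat) : Prop :=
  c.1 < g.length ∧ c.2 < (g.getD c.1 []).length

-- the two Python-level index/swap helpers at Nat indices
theorem pvGet_natCast (g : List (List String)) (a b : Nat) : pvGet g a b = cg g a b := by
  simp [pvGet, cg, PySem.List.pyGet?_natCast, List.getD_eq_getElem?_getD]
theorem pvSet_natCast (g : List (List String)) (a b : Nat) (v : String) :
    pvSet g (a : Int) (b : Int) v = cset g (a, b) v := by
  simp [pvSet, cset, PySem.List.pyGet?_natCast, PySem.List.pySetD_natCast, List.getD_eq_getElem?_getD]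
theorem pvSwap_natCast (g : List (List String)) (a b c d : Nat) :
    pvSwap g (a : Int) (b : Int) (c : Int) (d : Int) = cswap g (a, b) (c, d) := by
  simp [pvSwap, cswap, pvGet_natCast, pvSet_natCast, cg2]

-- named pieces of the two ports (definitionally equal to the lets inside them)
def wdt (grid : List (List String)) : Int := ((PySem.List.pyGet? grid 0).getD []).length

def m1 (grid : List (List String)) : List (Int × Int × Int × String) :=
  (PySem.List.enumerate grid).foldl (fun acc yr =>
    (PySem.List.enumerate yr.2).foldl (fun acc2 xp =>
      if xp.2 = ">" then
        let np := PySem.Int.mod (xp.1 + 1) (wdt grid)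
        if pvGet grid yr.1 np = "." then acc2 ++ [(xp.1, yr.1, np, xp.2)] else acc2
      else acc2) acc) []

def gE (grid : List (List String)) : List (List String) :=
  (m1 grid).foldl (fun g m =>
      if m.2.2.2 = ">" then pvSwap g m.2.1 m.1 m.2.1 m.2.2.1 else g) grid

def m2 (grid : List (List String)) : List (Int × Int × Int × String) :=
  (PySem.List.enumerate (gE grid)).foldl (fun acc yr =>
    (PySem.List.enumerate yr.2).foldl (fun acc2 xp =>
      if xp.2 = "v" then
        let np := PySem.Int.mod (yr.1 + 1) (grid.length : Int)
        if pvGet (gE grid) np xp.1 = "." then acc2 ++ [(xp.1, yr.1, np, xp.2)] else acc2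
      else acc2) acc) []

theorem stepGrid_eq (grid : List (List String)) :
    stepGrid grid = (decide (0 < (m1 grid).length) || decide (0 < (m2 grid).length)) := rfl

def eastG (grid : List (List String)) : List (List String) := grid.map pullEastRow

def southG (grid : List (List String)) : List (List String) :=
  (PySem.List.enumerate (eastG grid)).map (fun yr =>
    (PySem.List.enumerate yr.2).map (fun xc =>
      if xc.2 = "." ∧ pvGet (eastG grid) (PySem.Int.mod (yr.1 - 1) (grid.length : Int)) xc.1 = "v" then "v"
      else if xc.2 = "v" ∧ pvGet (eastG grid) (PySem.Int.mod (yr.1 + 1) (grid.length : Int)) xc.1 = "." then "."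
      else xc.2))

theorem stepGrid_alt_eq (grid : List (List String)) :
    stepGrid_alt grid =
      ((grid.zip (eastG grid)).any (fun rn => decide (rn.2 ≠ rn.1)) ||
       ((eastG grid).zip (southG grid)).any (fun rn => decide (rn.2 ≠ rn.1))) := rfl

theorem shape_cset (g : List (List String)) (c : Nat × Nat) (v : String) :
    SameShape (cset g c v) g := by
  constructor
  · simp [cset]
  · intro i
    simp only [cset, List.getD_eq_getElem?_getD, List.getElem?_set]
    split_ifs with h1 h2
    · subst h1; simp
    · subst h1; simp [List.getElem?_eq_none (by omega : g.length ≤ c.1)]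
    · rfl

theorem shape_trans {a b c : List (List String)} (h1 : SameShape a b) (h2 : SameShape b c) :
    SameShape a c := ⟨h1.1.trans h2.1, fun i => (h1.2 i).trans (h2.2 i)⟩

theorem shape_refl (g : List (List String)) : SameShape g g := ⟨rfl, fun _ => rfl⟩

theorem shape_cswap (g : List (List String)) (s t : Nat × Nat) : SameShape (cswap g s t) g :=
  shape_trans (shape_trans (shape_cset _ _ _) (shape_cset _ _ _)) (shape_refl g)

theorem inB_of_shape {s g : List (List String)} (h : SameShape s g) {c : Nat × Nat}
    (hc : InB g c) : InB s c := by
  refine ⟨by rw [h.1]; exact hc.1, by rw [h.2 c.1]; exact hc.2⟩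

theorem cg2_cset_self (g : List (List String)) (c : Nat × Nat) (v : String) (h : InB g c) :
    cg2 (cset g c v) c = v := by
  obtain ⟨h1, h2⟩ := h
  rw [List.getD_eq_getElem?_getD] at h2
  simp only [cg2, cg, cset, List.getD_eq_getElem?_getD]
  rw [List.getElem?_set_self h1]
  simp only [Option.getD_some]
  rw [List.getElem?_set_self h2]
  rfl

theorem cg2_cset_ne (g : List (List String)) (c c' : Nat × Nat) (v : String) (h : c' ≠ c) :
    cg2 (cset g c v) c' = cg2 g c' := by
  by_cases hy : c.1 = c'.1
  · have hx : c.2 ≠ c'.2 := by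
      intro h2
      exact h (Prod.ext_iff.mpr ⟨hy.symm, h2.symm⟩)
    simp only [cg2, cg, cset, List.getD_eq_getElem?_getD]
    rw [← hy, List.getElem?_set]
    split_ifs with hlen hlen2
    · simp only [Option.getD_some]
      rw [List.getElem?_set_ne hx]
    · simp [List.getElem?_eq_none (by omega : g.length ≤ c.1)]
    · rfl
  · simp only [cg2, cg, cset, List.getD_eq_getElem?_getD]
    rw [List.getElem?_set_ne hy]

theorem cg2_cswap_fst (g : List (List String)) (s t : Nat × Nat) (hst : s ≠ t)
    (hs : InB g s) : cg2 (cswap g s t) s = cg2 g t := by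
  rw [cswap, cg2_cset_ne _ _ _ _ hst, cg2_cset_self _ _ _ hs]

theorem cg2_cswap_snd (g : List (List String)) (s t : Nat × Nat)
    (ht : InB g t) : cg2 (cswap g s t) t = cg2 g s := by
  rw [cswap, cg2_cset_self _ _ _ (inB_of_shape (shape_cset g s (cg2 g t)) ht)]

theorem cg2_cswap_other (g : List (List String)) (s t c : Nat × Nat)
    (h1 : c ≠ s) (h2 : c ≠ t) : cg2 (cswap g s t) c = cg2 g c := by
  rw [cswap, cg2_cset_ne _ _ _ _ h2, cg2_cset_ne _ _ _ _ h1]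

theorem swapFold (g0 : List (List String)) :
    ∀ (ps : List ((Nat × Nat) × (Nat × Nat))) (s : List (List String)),
      SameShape s g0 →
      (ps.flatMap (fun p => [p.1, p.2])).Nodup →
      (∀ p ∈ ps, InB g0 p.1 ∧ InB g0 p.2) →
      (∀ p ∈ ps, cg2 s p.1 = cg2 g0 p.1 ∧ cg2 s p.2 = cg2 g0 p.2) →
      SameShape (ps.foldl (fun g p => cswap g p.1 p.2) s) g0 ∧
      (∀ p ∈ ps, cg2 (ps.foldl (fun g p => cswap g p.1 p.2) s) p.1 = cg2 g0 p.2 ∧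
                 cg2 (ps.foldl (fun g p => cswap g p.1 p.2) s) p.2 = cg2 g0 p.1) ∧
      (∀ c, (∀ p ∈ ps, c ≠ p.1 ∧ c ≠ p.2) →
        cg2 (ps.foldl (fun g p => cswap g p.1 p.2) s) c = cg2 s c) := by
  intro ps
  induction ps with
  | nil => intro s hsh _ _ _; exact ⟨hsh, by simp, by simp⟩
  | cons p tl ih =>
    intro s hsh hnd hin hag
    rw [List.flatMap_cons, List.nodup_append] at hnd
    obtain ⟨h1, hnd', h3⟩ := hnd
    have hp12 : p.1 ≠ p.2 := by simp at h1; exact h1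
    have hdisj : ∀ q ∈ tl, p.1 ≠ q.1 ∧ p.1 ≠ q.2 ∧ p.2 ≠ q.1 ∧ p.2 ≠ q.2 := by
      intro q hq
      have m1 : q.1 ∈ tl.flatMap (fun p => [p.1, p.2]) := List.mem_flatMap.mpr ⟨q, hq, by simp⟩
      have m2 : q.2 ∈ tl.flatMap (fun p => [p.1, p.2]) := List.mem_flatMap.mpr ⟨q, hq, by simp⟩
      have d1 : p.1 ∉ tl.flatMap (fun p => [p.1, p.2]) := fun m => h3 p.1 (by simp) p.1 m rfl
      have d2 : p.2 ∉ tl.flatMap (fun p => [p.1, p.2]) := fun m => h3 p.2 (by simp) p.2 m rfl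
      exact ⟨fun e => d1 (e ▸ m1), fun e => d1 (e ▸ m2), fun e => d2 (e ▸ m1), fun e => d2 (e ▸ m2)⟩
    have hinp := hin p List.mem_cons_self
    have hagp := hag p List.mem_cons_self
    have hs'1 : cg2 (cswap s p.1 p.2) p.1 = cg2 g0 p.2 := by
      rw [cg2_cswap_fst s p.1 p.2 hp12 (inB_of_shape hsh hinp.1)]
      have : cg2 s p.2 = cg2 g0 p.2 := hagp.2
      exact this
    have hs'2 : cg2 (cswap s p.1 p.2) p.2 = cg2 g0 p.1 := by
      rw [cg2_cswap_snd s p.1 p.2 (inB_of_shape hsh hinp.2)]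
      exact hagp.1
    have hs'o : ∀ c, c ≠ p.1 → c ≠ p.2 → cg2 (cswap s p.1 p.2) c = cg2 s c :=
      fun c a b => cg2_cswap_other s p.1 p.2 c a b
    have hsh' : SameShape (cswap s p.1 p.2) g0 := shape_trans (shape_cswap s p.1 p.2) hsh
    have hag' : ∀ q ∈ tl, cg2 (cswap s p.1 p.2) q.1 = cg2 g0 q.1 ∧
        cg2 (cswap s p.1 p.2) q.2 = cg2 g0 q.2 := by
      intro q hq
      obtain ⟨d1, d2, d3, d4⟩ := hdisj q hq
      rw [hs'o q.1 (Ne.symm d1) (Ne.symm d3), hs'o q.2 (Ne.symm d2) (Ne.symm d4)]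
      exact hag q (List.mem_cons_of_mem p hq)
    obtain ⟨ihsh, ihswap, ihother⟩ :=
      ih (cswap s p.1 p.2) hsh' hnd' (fun q hq => hin q (List.mem_cons_of_mem p hq)) hag'
    simp only [List.foldl_cons]
    refine ⟨ihsh, ?_, ?_⟩
    · intro q hq
      rcases List.mem_cons.mp hq with rfl | hq'
      · constructor
        · rw [ihother q.1 (fun r hr => ⟨(hdisj r hr).1, (hdisj r hr).2.1⟩)]
          exact hs'1
        · rw [ihother q.2 (fun r hr => ⟨(hdisj r hr).2.2.1, (hdisj r hr).2.2.2⟩)]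
          exact hs'2
      · exact ihswap q hq'
    · intro c hc
      rw [ihother c (fun r hr => hc r (List.mem_cons_of_mem p hr))]
      exact hs'o c (hc p List.mem_cons_self).1 (hc p List.mem_cons_self).2

def nxt (Wd x : Nat) : Nat := (x + 1) % Wd
def prv (Wd x : Nat) : Nat := (x + Wd - 1) % Wd
abbrev srcE (g : List (List String)) (Wd y x : Nat) : Prop :=
  cg g y x = ">" ∧ cg g y (nxt Wd x) = "."

theorem m1_eq (grid : List (List String)) :
    m1 grid = (PySem.List.enumerate grid).flatMap (fun yr =>
      (PySem.List.enumerate yr.2).flatMap (fun xp =>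
        if xp.2 = ">" ∧ pvGet grid yr.1 (PySem.Int.mod (xp.1 + 1) (wdt grid)) = "." then
          [(xp.1, yr.1, PySem.Int.mod (xp.1 + 1) (wdt grid), xp.2)] else [])) := by
  have inner : ∀ (y : Int) (row : List String) (acc : List (Int × Int × Int × String)),
      (PySem.List.enumerate row).foldl (fun acc2 xp =>
        if xp.2 = ">" then
          let np := PySem.Int.mod (xp.1 + 1) (wdt grid)
          if pvGet grid y np = "." then acc2 ++ [(xp.1, y, np, xp.2)] else acc2
        else acc2) acc
      = acc ++ (PySem.List.enumerate row).flatMap (fun xp =>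
        if xp.2 = ">" ∧ pvGet grid y (PySem.Int.mod (xp.1 + 1) (wdt grid)) = "." then
          [(xp.1, y, PySem.Int.mod (xp.1 + 1) (wdt grid), xp.2)] else []) := by
    intro y row acc
    rw [show (fun acc2 (xp : Int × String) =>
        if xp.2 = ">" then
          let np := PySem.Int.mod (xp.1 + 1) (wdt grid)
          if pvGet grid y np = "." then acc2 ++ [(xp.1, y, np, xp.2)] else acc2
        else acc2)
      = (fun acc2 xp => acc2 ++ (if xp.2 = ">" ∧ pvGet grid y (PySem.Int.mod (xp.1 + 1) (wdt grid)) = "." then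
          [(xp.1, y, PySem.Int.mod (xp.1 + 1) (wdt grid), xp.2)] else [])) from
        funext fun acc2 => funext fun xp => by split_ifs <;> simp_all]
    exact PySem.List.foldl_append_eq_flatMap _ _ _
  rw [m1]
  rw [show (fun acc (yr : Int × List String) =>
      (PySem.List.enumerate yr.2).foldl (fun acc2 xp =>
        if xp.2 = ">" then
          let np := PySem.Int.mod (xp.1 + 1) (wdt grid)
          if pvGet grid yr.1 np = "." then acc2 ++ [(xp.1, yr.1, np, xp.2)] else acc2
        else acc2) acc)
    = (fun acc yr => acc ++ (PySem.List.enumerate yr.2).flatMap (fun xp =>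
        if xp.2 = ">" ∧ pvGet grid yr.1 (PySem.Int.mod (xp.1 + 1) (wdt grid)) = "." then
          [(xp.1, yr.1, PySem.Int.mod (xp.1 + 1) (wdt grid), xp.2)] else [])) from
      funext fun acc => funext fun yr => inner yr.1 yr.2 acc]
  rw [PySem.List.foldl_append_eq_flatMap]
  simp

theorem cg_eq_getElem (g : List (List String)) (y x : Nat) (hy : y < g.length)
    (hx : x < g[y].length) : cg g y x = g[y][x] := by
  have h1 : g.getD y [] = g[y] := List.getD_eq_getElem g [] hy
  rw [cg, h1, List.getD_eq_getElem _ _ hx]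

theorem mem_m1 (grid : List (List String)) (W : Nat) (hWd : wdt grid = (W : Int))
    (hrect : ∀ row ∈ grid, row.length = W) (t : Int × Int × Int × String) :
    t ∈ m1 grid ↔ ∃ y x : Nat, y < grid.length ∧ x < W ∧ srcE grid W y x ∧
      t = ((x : Int), (y : Int), ((nxt W x : Nat) : Int), ">") := by
  have hmodcast : ∀ j : Nat, PySem.Int.mod ((j : Int) + 1) (wdt grid) = ((nxt W j : Nat) : Int) := by
    intro j
    rw [hWd, show ((j : Int) + 1) = ((j + 1 : Nat) : Int) by push_cast; ring]
    rw [PySem.Int.mod_natCast]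
    rfl
  rw [m1_eq]
  simp only [List.mem_flatMap, PySem.List.mem_enumerate_iff]
  constructor
  · rintro ⟨yr, ⟨k, hk, rfl⟩, xp, ⟨j, hj, rfl⟩, hmem⟩
    simp only [zero_add] at hmem hj
    rw [hmodcast j] at hmem
    rw [pvGet_natCast] at hmem
    split_ifs at hmem with hc
    · simp only [List.mem_singleton] at hmem
      have hjW : j < W := by rw [← hrect grid[k] (List.getElem_mem hk)]; exact hj
      refine ⟨k, j, hk, hjW, ⟨?_, hc.2⟩, by rw [hmem, hc.1]⟩
      rw [cg_eq_getElem grid k j hk hj]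
      exact hc.1
    · simp at hmem
  · rintro ⟨y, x, hy, hx, ⟨hsrc1, hsrc2⟩, rfl⟩
    have hxlen : x < grid[y].length := by rw [hrect grid[y] (List.getElem_mem hy)]; exact hx
    refine ⟨((y : Int), grid[y]), ⟨y, hy, by simp⟩, ((x : Int), grid[y][x]), ⟨x, hxlen, by simp⟩, ?_⟩
    rw [hmodcast x, pvGet_natCast]
    rw [← cg_eq_getElem grid y x hy hxlen, hsrc1]
    simp only [hsrc2]
    simp

theorem nxt_lt {W x : Nat} (hx : x < W) : nxt W x < W := Nat.mod_lt _ (by omega)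
theorem prv_lt {W x : Nat} (hW : 0 < W) : prv W x < W := Nat.mod_lt _ hW

theorem nxt_eq {W x : Nat} (hx : x < W) : nxt W x = if x + 1 = W then 0 else x + 1 := by
  unfold nxt
  split_ifs with h
  · rw [h, Nat.mod_self]
  · exact Nat.mod_eq_of_lt (by omega)

theorem prv_eq {W x : Nat} (hx : x < W) : prv W x = if x = 0 then W - 1 else x - 1 := by
  unfold prv
  split_ifs with h
  · subst h; simp only [Nat.zero_add]; exact Nat.mod_eq_of_lt (by omega)
  · rw [show x + W - 1 = (x - 1) + W by omega, Nat.add_mod_right]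
    exact Nat.mod_eq_of_lt (by omega)

theorem nxt_inj {W x x' : Nat} (hx : x < W) (hx' : x' < W) (h : nxt W x = nxt W x') : x = x' := by
  rw [nxt_eq hx, nxt_eq hx'] at h
  split_ifs at h <;> omega

theorem nxt_prv {W x : Nat} (hx : x < W) : nxt W (prv W x) = x := by
  have h1 := prv_eq hx
  rw [h1]
  split_ifs with h
  · rw [nxt_eq (by omega : W - 1 < W)]
    split_ifs <;> omega
  · rw [nxt_eq (by omega : x - 1 < W)]
    split_ifs <;> omega

theorem prv_nxt {W x : Nat} (hx : x < W) : prv W (nxt W x) = x := by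
  have h1 : nxt W (prv W (nxt W x)) = nxt W x := nxt_prv (nxt_lt hx)
  exact nxt_inj (prv_lt (by omega : 0 < W)) hx h1

def psE (grid : List (List String)) : List ((Nat × Nat) × (Nat × Nat)) :=
  (m1 grid).map (fun m => ((m.2.1.toNat, m.1.toNat), (m.2.1.toNat, m.2.2.1.toNat)))

theorem mem_psE (grid : List (List String)) (W : Nat) (hWd : wdt grid = (W : Int))
    (hrect : ∀ row ∈ grid, row.length = W) (q : (Nat × Nat) × (Nat × Nat)) :
    q ∈ psE grid ↔ ∃ y x : Nat, y < grid.length ∧ x < W ∧ srcE grid W y x ∧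
      q = ((y, x), (y, nxt W x)) := by
  unfold psE
  rw [List.mem_map]
  constructor
  · rintro ⟨m, hm, rfl⟩
    obtain ⟨y, x, hy, hx, hsrc, rfl⟩ := (mem_m1 grid W hWd hrect m).mp hm
    exact ⟨y, x, hy, hx, hsrc, by simp⟩
  · rintro ⟨y, x, hy, hx, hsrc, rfl⟩
    refine ⟨((x : Int), (y : Int), ((nxt W x : Nat) : Int), ">"),
      (mem_m1 grid W hWd hrect _).mpr ⟨y, x, hy, hx, hsrc, rfl⟩, by simp⟩

theorem gE_eq_fold (grid : List (List String)) (W : Nat) (hWd : wdt grid = (W : Int))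
    (hrect : ∀ row ∈ grid, row.length = W) :
    gE grid = (psE grid).foldl (fun g p => cswap g p.1 p.2) grid := by
  unfold gE psE
  rw [List.foldl_map]
  apply PySem.List.foldl_congr_mem
  intro g m hm
  obtain ⟨y, x, hy, hx, hsrc, rfl⟩ := (mem_m1 grid W hWd hrect m).mp hm
  simp only [if_true]
  have := pvSwap_natCast g y x y (nxt W x)
  simpa using this

theorem m1_pairwise (grid : List (List String)) :
    (m1 grid).Pairwise (fun a b => a.2.1 = b.2.1 → a.1 ≠ b.1) := by
  rw [m1_eq]
  refine List.pairwise_flatMap.mpr ⟨?_, ?_⟩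
  · intro yr _
    refine List.pairwise_flatMap.mpr ⟨?_, ?_⟩
    · intro xp _
      split_ifs <;> simp
    · refine (PySem.List.pairwise_lt_enumerate yr.2 0).imp ?_
      intro xp xp' h a ha b hb
      have ha' : a.1 = xp.1 := by split_ifs at ha <;> simp_all
      have hb' : b.1 = xp'.1 := by split_ifs at hb <;> simp_all
      intro _
      rw [ha', hb']
      omega
  · refine (PySem.List.pairwise_lt_enumerate grid 0).imp ?_
    intro yr yr' h a ha b hb
    obtain ⟨xp, _, hma⟩ := List.mem_flatMap.mp ha
    obtain ⟨xp', _, hmb⟩ := List.mem_flatMap.mp hb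
    have ha' : a.2.1 = yr.1 := by split_ifs at hma <;> simp_all
    have hb' : b.2.1 = yr'.1 := by split_ifs at hmb <;> simp_all
    intro he
    rw [ha', hb'] at he
    omega

theorem psE_cells_nodup (grid : List (List String)) (W : Nat) (hWd : wdt grid = (W : Int))
    (hrect : ∀ row ∈ grid, row.length = W) :
    ((psE grid).flatMap (fun p => [p.1, p.2])).Nodup := by
  have vals : ∀ yy xx yy' xx' : Nat, cg grid yy xx = ">" → cg grid yy' xx' = "." →
      ((yy, xx) : Nat × Nat) ≠ (yy', xx') := by
    intro yy xx yy' xx' h1 h2 he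
    obtain ⟨e1, e2⟩ := Prod.ext_iff.mp he
    simp only at e1 e2
    rw [e1, e2, h2] at h1
    exact absurd h1 (by decide)
  have cross : (psE grid).Pairwise (fun p q =>
      ∀ c ∈ [p.1, p.2], ∀ c' ∈ [q.1, q.2], c ≠ c') := by
    unfold psE
    rw [List.pairwise_map]
    refine List.Pairwise.imp_of_mem ?_ (m1_pairwise grid)
    intro a b hma hmb hr
    obtain ⟨y, x, hy, hx, hsrc, rfl⟩ := (mem_m1 grid W hWd hrect a).mp hma
    obtain ⟨y', x', hy', hx', hsrc', rfl⟩ := (mem_m1 grid W hWd hrect b).mp hmb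
    simp only [Int.toNat_natCast]
    simp only [Nat.cast_inj, Ne] at hr
    intro c hc c' hc'
    have hxx : y = y' → x ≠ x' := hr
    rcases List.mem_pair.mp hc with rfl | rfl <;> rcases List.mem_pair.mp hc' with rfl | rfl
    · intro he
      obtain ⟨e1, e2⟩ := Prod.ext_iff.mp he
      exact hxx e1 e2
    · exact vals y x y' (nxt W x') hsrc.1 hsrc'.2
    · exact fun he => vals y' x' y (nxt W x) hsrc'.1 hsrc.2 he.symm
    · intro he
      obtain ⟨e1, e2⟩ := Prod.ext_iff.mp he
      exact hxx e1 (nxt_inj hx hx' e2)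
  refine List.pairwise_flatMap.mpr ⟨?_, cross⟩
  intro p hp
  obtain ⟨y, x, hy, hx, hsrc, rfl⟩ := (mem_psE grid W hWd hrect p).mp hp
  refine List.pairwise_pair.mpr ?_
  exact vals y x y (nxt W x) hsrc.1 hsrc.2

theorem psE_inB (grid : List (List String)) (W : Nat) (hWd : wdt grid = (W : Int))
    (hrect : ∀ row ∈ grid, row.length = W) :
    ∀ q ∈ psE grid, InB grid q.1 ∧ InB grid q.2 := by
  intro q hq
  obtain ⟨y, x, hy, hx, _, rfl⟩ := (mem_psE grid W hWd hrect q).mp hq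
  have hlen : (grid.getD y []).length = W := by
    rw [List.getD_eq_getElem grid [] hy]
    exact hrect grid[y] (List.getElem_mem hy)
  exact ⟨⟨hy, by rw [hlen]; exact hx⟩, ⟨hy, by rw [hlen]; exact nxt_lt hx⟩⟩

theorem int_mod_succ (x W : Nat) :
    PySem.Int.mod ((x : Int) + 1) (W : Int) = ((nxt W x : Nat) : Int) := by
  rw [show ((x : Int) + 1) = ((x + 1 : Nat) : Int) by push_cast; ring, PySem.Int.mod_natCast]
  rfl

theorem int_mod_pred (x W : Nat) (hW : 0 < W) :
    PySem.Int.mod ((x : Int) - 1) (W : Int) = ((prv W x : Nat) : Int) := by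
  rw [PySem.Int.mod_eq_emod_of_pos (by exact_mod_cast hW)]
  rw [show (x : Int) - 1 = ((x + W - 1 : Nat) : Int) - (W : Int) by omega]
  rw [Int.sub_emod_right]
  rw [show ((x + W - 1 : Nat) : Int) % (W : Int) = (((x + W - 1) % W : Nat) : Int) by push_cast; ring]
  rfl

theorem gE_char (grid : List (List String)) (W : Nat) (hWd : wdt grid = (W : Int))
    (hrect : ∀ row ∈ grid, row.length = W) :
    SameShape (gE grid) grid ∧
    ∀ y x : Nat, y < grid.length → x < W →
      cg (gE grid) y x =
        if srcE grid W y x then "." else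
        if srcE grid W y (prv W x) then ">" else cg grid y x := by
  rw [gE_eq_fold grid W hWd hrect]
  obtain ⟨hsh, hswap, hother⟩ := swapFold grid (psE grid) grid (shape_refl grid)
    (psE_cells_nodup grid W hWd hrect) (psE_inB grid W hWd hrect)
    (fun p _ => ⟨rfl, rfl⟩)
  refine ⟨hsh, ?_⟩
  intro y x hy hx
  by_cases h1 : srcE grid W y x
  · rw [if_pos h1]
    have hp : ((y, x), (y, nxt W x)) ∈ psE grid :=
      (mem_psE grid W hWd hrect _).mpr ⟨y, x, hy, hx, h1, rfl⟩
    have h := (hswap _ hp).1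
    simp only [cg2] at h
    rw [h]
    exact h1.2
  · rw [if_neg h1]
    by_cases h2 : srcE grid W y (prv W x)
    · rw [if_pos h2]
      have hp : ((y, prv W x), (y, nxt W (prv W x))) ∈ psE grid :=
        (mem_psE grid W hWd hrect _).mpr ⟨y, prv W x, hy, prv_lt (by omega), h2, rfl⟩
      have h := (hswap _ hp).2
      rw [nxt_prv hx] at h
      simp only [cg2] at h
      rw [h]
      exact h2.1
    · rw [if_neg h2]
      have h := hother (y, x) ?_
      · simpa [cg2] using h
      · intro p hp
        obtain ⟨y', x', hy', hx', hsrc', rfl⟩ := (mem_psE grid W hWd hrect p).mp hp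
        constructor
        · intro he
          obtain ⟨e1, e2⟩ := Prod.ext_iff.mp he
          simp only at e1 e2
          subst e1; subst e2
          exact h1 hsrc'
        · intro he
          obtain ⟨e1, e2⟩ := Prod.ext_iff.mp he
          simp only at e1 e2
          subst e1
          apply h2
          rw [e2, prv_nxt hx']
          exact hsrc'

theorem length_pullEastRow (row : List String) : (pullEastRow row).length = row.length := by
  simp [pullEastRow, PySem.List.length_enumerate]

theorem eastG_shape (grid : List (List String)) : SameShape (eastG grid) grid := by
  refine ⟨by simp [eastG], fun i => ?_⟩
  by_cases h : i < grid.length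
  · rw [List.getD_eq_getElem _ _ (by simpa [eastG] : i < (eastG grid).length),
      List.getD_eq_getElem _ _ h]
    simp [eastG, length_pullEastRow]
  · rw [List.getD_eq_default _ _ (by simpa [eastG] using le_of_not_gt h),
      List.getD_eq_default _ _ (le_of_not_gt h)]

theorem cg_eastG (grid : List (List String)) (W : Nat)
    (hrect : ∀ row ∈ grid, row.length = W) (y x : Nat) (hy : y < grid.length) (hx : x < W) :
    cg (eastG grid) y x =
      if cg grid y x = "." ∧ cg grid y (prv W x) = ">" then ">" else
      if cg grid y x = ">" ∧ cg grid y (nxt W x) = "." then "." else cg grid y x := by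
  have hrl : grid[y].length = W := hrect _ (List.getElem_mem hy)
  have hrow : grid.getD y [] = grid[y] := List.getD_eq_getElem _ _ hy
  have h1 : cg (eastG grid) y x = (pullEastRow grid[y]).getD x "" := by
    rw [cg, List.getD_eq_getElem _ _ (by simpa [eastG] : y < (eastG grid).length)]
    congr 1
    simp [eastG]
  have hxlen : x < grid[y].length := by omega
  have h2 : (pullEastRow grid[y]).getD x "" =
      (if grid[y][x] = "." ∧ (PySem.List.pyGet? grid[y] (PySem.Int.mod ((x : Int) - 1) (grid[y].length : Int))).getD "" = ">" then ">"
       else if grid[y][x] = ">" ∧ (PySem.List.pyGet? grid[y] (PySem.Int.mod ((x : Int) + 1) (grid[y].length : Int))).getD "" = "." then "."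
       else grid[y][x]) := by
    simp only [pullEastRow, List.getD_eq_getElem?_getD, List.getElem?_map,
      PySem.List.getElem?_enumerate, List.getElem?_eq_getElem hxlen]
    simp
  rw [h1, h2]
  simp only [hrl]
  rw [int_mod_pred x W (by omega), int_mod_succ x W]
  rw [PySem.List.pyGet?_natCast, PySem.List.pyGet?_natCast]
  have e0 : grid[y][x] = cg grid y x := (cg_eq_getElem grid y x hy hxlen).symm
  have e1 : (grid[y][(prv W x)]?).getD "" = cg grid y (prv W x) := by
    rw [cg, hrow, List.getD_eq_getElem?_getD]
  have e2 : (grid[y][(nxt W x)]?).getD "" = cg grid y (nxt W x) := by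
    rw [cg, hrow, List.getD_eq_getElem?_getD]
  simp only [e0, e1, e2]

theorem gE_eq_eastG (grid : List (List String)) (W : Nat) (hWd : wdt grid = (W : Int))
    (hrect : ∀ row ∈ grid, row.length = W) : gE grid = eastG grid := by
  obtain ⟨hsh, hchar⟩ := gE_char grid W hWd hrect
  have hsh' := eastG_shape grid
  apply List.ext_getElem (by rw [hsh.1, hsh'.1])
  intro y hy1 hy2
  have hy : y < grid.length := by rw [← hsh.1]; exact hy1
  have hrl : grid[y].length = W := hrect _ (List.getElem_mem hy)
  apply List.ext_getElem
  · have a1 := hsh.2 y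
    have a2 := hsh'.2 y
    rw [List.getD_eq_getElem _ _ hy1, List.getD_eq_getElem _ _ hy2] at *
    rw [a1, ← a2]
  · intro x hx1 hx2
    have hxW : x < W := by
      have := hsh.2 y
      rw [List.getD_eq_getElem _ _ hy1, List.getD_eq_getElem _ _ hy] at this
      rw [this, hrl] at hx1
      exact hx1
    have c1 : (gE grid)[y][x] = cg (gE grid) y x := (cg_eq_getElem _ y x hy1 hx1).symm
    have c2 : (eastG grid)[y][x] = cg (eastG grid) y x := (cg_eq_getElem _ y x hy2 hx2).symm
    rw [c1, c2, hchar y x hy hxW, cg_eastG grid W hrect y x hy hxW]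
    by_cases h1 : srcE grid W y x
    · rw [if_pos h1]
      have : ¬ (cg grid y x = "." ∧ cg grid y (prv W x) = ">") := by
        intro hc
        rw [h1.1] at hc
        exact absurd hc.1 (by decide)
      rw [if_neg this, if_pos ⟨h1.1, h1.2⟩]
    · rw [if_neg h1]
      by_cases h2 : srcE grid W y (prv W x)
      · rw [if_pos h2]
        have hc1 : cg grid y x = "." := by
          have := h2.2
          rwa [nxt_prv hxW] at this
        rw [if_pos ⟨hc1, h2.1⟩]
      · have hc1 : ¬ (cg grid y x = "." ∧ cg grid y (prv W x) = ">") := by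
          intro hc
          exact h2 ⟨hc.2, by rw [nxt_prv hxW]; exact hc.1⟩
        rw [if_neg h2, if_neg hc1, if_neg h1]

abbrev srcS (g : List (List String)) (Hd y x : Nat) : Prop :=
  cg g y x = "v" ∧ cg g (nxt Hd y) x = "."

theorem m2_flatMap (grid : List (List String)) :
    m2 grid = (PySem.List.enumerate (gE grid)).flatMap (fun yr =>
      (PySem.List.enumerate yr.2).flatMap (fun xp =>
        if xp.2 = "v" ∧ pvGet (gE grid) (PySem.Int.mod (yr.1 + 1) (grid.length : Int)) xp.1 = "." then
          [(xp.1, yr.1, PySem.Int.mod (yr.1 + 1) (grid.length : Int), xp.2)] else [])) := by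
  have inner : ∀ (y : Int) (row : List String) (acc : List (Int × Int × Int × String)),
      (PySem.List.enumerate row).foldl (fun acc2 xp =>
        if xp.2 = "v" then
          let np := PySem.Int.mod (y + 1) (grid.length : Int)
          if pvGet (gE grid) np xp.1 = "." then acc2 ++ [(xp.1, y, np, xp.2)] else acc2
        else acc2) acc
      = acc ++ (PySem.List.enumerate row).flatMap (fun xp =>
        if xp.2 = "v" ∧ pvGet (gE grid) (PySem.Int.mod (y + 1) (grid.length : Int)) xp.1 = "." then
          [(xp.1, y, PySem.Int.mod (y + 1) (grid.length : Int), xp.2)] else []) := by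
    intro y row acc
    rw [show (fun acc2 (xp : Int × String) =>
        if xp.2 = "v" then
          let np := PySem.Int.mod (y + 1) (grid.length : Int)
          if pvGet (gE grid) np xp.1 = "." then acc2 ++ [(xp.1, y, np, xp.2)] else acc2
        else acc2)
      = (fun acc2 xp => acc2 ++ (if xp.2 = "v" ∧ pvGet (gE grid) (PySem.Int.mod (y + 1) (grid.length : Int)) xp.1 = "." then
          [(xp.1, y, PySem.Int.mod (y + 1) (grid.length : Int), xp.2)] else [])) from
        funext fun acc2 => funext fun xp => by split_ifs <;> simp_all]
    exact PySem.List.foldl_append_eq_flatMap _ _ _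
  rw [m2]
  rw [show (fun acc (yr : Int × List String) =>
      (PySem.List.enumerate yr.2).foldl (fun acc2 xp =>
        if xp.2 = "v" then
          let np := PySem.Int.mod (yr.1 + 1) (grid.length : Int)
          if pvGet (gE grid) np xp.1 = "." then acc2 ++ [(xp.1, yr.1, np, xp.2)] else acc2
        else acc2) acc)
    = (fun acc yr => acc ++ (PySem.List.enumerate yr.2).flatMap (fun xp =>
        if xp.2 = "v" ∧ pvGet (gE grid) (PySem.Int.mod (yr.1 + 1) (grid.length : Int)) xp.1 = "." then
          [(xp.1, yr.1, PySem.Int.mod (yr.1 + 1) (grid.length : Int), xp.2)] else [])) from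
      funext fun acc => funext fun yr => inner yr.1 yr.2 acc]
  rw [PySem.List.foldl_append_eq_flatMap]
  simp

theorem eastG_rect (grid : List (List String)) (W : Nat)
    (hrect : ∀ row ∈ grid, row.length = W) :
    ∀ row ∈ eastG grid, row.length = W := by
  intro row hrow
  obtain ⟨r0, hr0, rfl⟩ := List.mem_map.mp hrow
  rw [length_pullEastRow]
  exact hrect r0 hr0

theorem mem_m2 (grid : List (List String)) (W : Nat) (hWd : wdt grid = (W : Int))
    (hrect : ∀ row ∈ grid, row.length = W) (t : Int × Int × Int × String) :
    t ∈ m2 grid ↔ ∃ y x : Nat, y < grid.length ∧ x < W ∧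
      srcS (eastG grid) grid.length y x ∧
      t = ((x : Int), (y : Int), ((nxt grid.length y : Nat) : Int), "v") := by
  have hE : gE grid = eastG grid := gE_eq_eastG grid W hWd hrect
  have hEl : (eastG grid).length = grid.length := by simp [eastG]
  have hrectE := eastG_rect grid W hrect
  rw [m2_flatMap, hE]
  simp only [List.mem_flatMap, PySem.List.mem_enumerate_iff]
  constructor
  · rintro ⟨yr, ⟨k, hk, rfl⟩, xp, ⟨j, hj, rfl⟩, hmem⟩
    simp only [zero_add] at hmem hj
    rw [int_mod_succ k grid.length, pvGet_natCast] at hmem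
    split_ifs at hmem with hc
    · simp only [List.mem_singleton] at hmem
      have hkH : k < grid.length := by rw [← hEl]; exact hk
      have hjW : j < W := by rw [← hrectE (eastG grid)[k] (List.getElem_mem hk)]; exact hj
      refine ⟨k, j, hkH, hjW, ⟨?_, hc.2⟩, by rw [hmem, hc.1]⟩
      rw [cg_eq_getElem (eastG grid) k j hk hj]
      exact hc.1
    · simp at hmem
  · rintro ⟨y, x, hy, hx, ⟨hsrc1, hsrc2⟩, rfl⟩
    have hyE : y < (eastG grid).length := by rw [hEl]; exact hy
    have hxlen : x < (eastG grid)[y].length := by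
      rw [hrectE (eastG grid)[y] (List.getElem_mem hyE)]; exact hx
    refine ⟨((y : Int), (eastG grid)[y]), ⟨y, hyE, by simp⟩,
      ((x : Int), (eastG grid)[y][x]), ⟨x, hxlen, by simp⟩, ?_⟩
    rw [int_mod_succ y grid.length, pvGet_natCast]
    rw [← cg_eq_getElem (eastG grid) y x hyE hxlen, hsrc1]
    simp only [hsrc2]
    simp

theorem southG_length (grid : List (List String)) :
    (southG grid).length = (eastG grid).length := by
  simp [southG, PySem.List.length_enumerate]

theorem southG_getElem (grid : List (List String)) (y : Nat) (hyE : y < (eastG grid).length) :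
    (southG grid)[y]'(by rw [southG_length]; exact hyE) =
      (PySem.List.enumerate (eastG grid)[y]).map (fun xc =>
        if xc.2 = "." ∧ pvGet (eastG grid) (PySem.Int.mod ((y : Int) - 1) (grid.length : Int)) xc.1 = "v" then "v"
        else if xc.2 = "v" ∧ pvGet (eastG grid) (PySem.Int.mod ((y : Int) + 1) (grid.length : Int)) xc.1 = "." then "."
        else xc.2) := by
  simp only [southG]
  rw [List.getElem_map]
  rw [PySem.List.getElem_enumerate]
  simp

theorem southG_row_length (grid : List (List String)) (y : Nat) (hyE : y < (eastG grid).length) :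
    ((southG grid)[y]'(by rw [southG_length]; exact hyE)).length = (eastG grid)[y].length := by
  rw [southG_getElem grid y hyE]
  simp [PySem.List.length_enumerate]

theorem cg_southG (grid : List (List String)) (W : Nat)
    (hrect : ∀ row ∈ grid, row.length = W) (y x : Nat) (hy : y < grid.length) (hx : x < W) :
    cg (southG grid) y x =
      if cg (eastG grid) y x = "." ∧ cg (eastG grid) (prv grid.length y) x = "v" then "v"
      else if cg (eastG grid) y x = "v" ∧ cg (eastG grid) (nxt grid.length y) x = "." then "."
      else cg (eastG grid) y x := by
  have hEl : (eastG grid).length = grid.length := by simp [eastG]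
  have hyE : y < (eastG grid).length := by rw [hEl]; exact hy
  have hxlen : x < (eastG grid)[y].length := by
    rw [eastG_rect grid W hrect (eastG grid)[y] (List.getElem_mem hyE)]; exact hx
  have hyS : y < (southG grid).length := by rw [southG_length]; exact hyE
  have h1 : cg (southG grid) y x =
      ((southG grid)[y]'hyS).getD x "" := by
    rw [cg, List.getD_eq_getElem _ _ hyS]
  rw [h1, southG_getElem grid y hyE]
  have h2 : ((PySem.List.enumerate (eastG grid)[y]).map (fun xc =>
        if xc.2 = "." ∧ pvGet (eastG grid) (PySem.Int.mod ((y : Int) - 1) (grid.length : Int)) xc.1 = "v" then "v"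
        else if xc.2 = "v" ∧ pvGet (eastG grid) (PySem.Int.mod ((y : Int) + 1) (grid.length : Int)) xc.1 = "." then "."
        else xc.2)).getD x "" =
      (if (eastG grid)[y][x] = "." ∧ pvGet (eastG grid) (PySem.Int.mod ((y : Int) - 1) (grid.length : Int)) (x : Int) = "v" then "v"
       else if (eastG grid)[y][x] = "v" ∧ pvGet (eastG grid) (PySem.Int.mod ((y : Int) + 1) (grid.length : Int)) (x : Int) = "." then "."
       else (eastG grid)[y][x]) := by
    simp only [List.getD_eq_getElem?_getD, List.getElem?_map,
      PySem.List.getElem?_enumerate, List.getElem?_eq_getElem hxlen]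
    simp
  rw [h2]
  rw [int_mod_pred y grid.length (by omega), int_mod_succ y grid.length]
  rw [pvGet_natCast, pvGet_natCast]
  rw [← cg_eq_getElem (eastG grid) y x hyE hxlen]

theorem row_eq_iff_cg (A B : List (List String)) (y : Nat) (hyA : y < A.length)
    (hyB : y < B.length) (hlen : A[y].length = B[y].length) :
    A[y] = B[y] ↔ ∀ x, x < A[y].length → cg A y x = cg B y x := by
  constructor
  · intro h x _
    rw [cg, cg, List.getD_eq_getElem _ _ hyA, List.getD_eq_getElem _ _ hyB, h]
  · intro h
    apply List.ext_getElem hlen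
    intro x hx1 hx2
    have hx := h x hx1
    rw [cg, cg, List.getD_eq_getElem _ _ hyA, List.getD_eq_getElem _ _ hyB,
      List.getD_eq_getElem _ _ hx1, List.getD_eq_getElem _ _ hx2] at hx
    exact hx

theorem moved1_eq (grid : List (List String)) (W : Nat) (hWd : wdt grid = (W : Int))
    (hrect : ∀ row ∈ grid, row.length = W) :
    decide (0 < (m1 grid).length) =
      (grid.zip (eastG grid)).any (fun rn => decide (rn.2 ≠ rn.1)) := by
  have hEl : (eastG grid).length = grid.length := by simp [eastG]
  have hzl : (grid.zip (eastG grid)).length = grid.length := by simp [hEl]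
  rw [Bool.eq_iff_iff]
  simp only [decide_eq_true_eq, List.any_eq_true]
  constructor
  · intro h
    obtain ⟨t, ht⟩ := List.exists_mem_of_length_pos h
    obtain ⟨y, x, hy, hx, hsrc, _⟩ := (mem_m1 grid W hWd hrect t).mp ht
    have hyE : y < (eastG grid).length := by rw [hEl]; exact hy
    refine ⟨(grid[y], (eastG grid)[y]),
      List.mem_iff_getElem.mpr ⟨y, by rw [hzl]; exact hy, by rw [List.getElem_zip]⟩, ?_⟩
    intro he
    have hlen : (eastG grid)[y].length = grid[y].length := by
      rw [eastG_rect grid W hrect _ (List.getElem_mem hyE), hrect _ (List.getElem_mem hy)]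
    have hcg := (row_eq_iff_cg (eastG grid) grid y hyE hy hlen).mp he x
      (by rw [eastG_rect grid W hrect _ (List.getElem_mem hyE)]; exact hx)
    rw [cg_eastG grid W hrect y x hy hx] at hcg
    rw [if_neg (by intro hc; rw [hsrc.1] at hc; exact absurd hc.1 (by decide)),
      if_pos ⟨hsrc.1, hsrc.2⟩] at hcg
    rw [hsrc.1] at hcg
    exact absurd hcg (by decide)
  · rintro ⟨rn, hrn, hne⟩
    obtain ⟨y, hyz, rfl⟩ := List.mem_iff_getElem.mp hrn
    rw [List.getElem_zip] at hne
    simp only at hne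
    have hy : y < grid.length := by rw [← hzl]; exact hyz
    have hyE : y < (eastG grid).length := by rw [hEl]; exact hy
    have hlen : (eastG grid)[y].length = grid[y].length := by
      rw [eastG_rect grid W hrect _ (List.getElem_mem hyE), hrect _ (List.getElem_mem hy)]
    have hdiff : ¬ ∀ x, x < (eastG grid)[y].length → cg (eastG grid) y x = cg grid y x := by
      intro hall
      exact hne ((row_eq_iff_cg (eastG grid) grid y hyE hy hlen).mpr hall)
    push Not at hdiff
    obtain ⟨x, hxlen, hxne⟩ := hdiff
    have hx : x < W := by
      rw [eastG_rect grid W hrect _ (List.getElem_mem hyE)] at hxlen; exact hxlen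
    rw [cg_eastG grid W hrect y x hy hx] at hxne
    have hsrc : ∃ y' x', y' < grid.length ∧ x' < W ∧ srcE grid W y' x' := by
      by_cases h1 : cg grid y x = "." ∧ cg grid y (prv W x) = ">"
      · exact ⟨y, prv W x, hy, prv_lt (by omega),
          ⟨h1.2, by rw [nxt_prv hx]; exact h1.1⟩⟩
      · rw [if_neg h1] at hxne
        by_cases h2 : cg grid y x = ">" ∧ cg grid y (nxt W x) = "."
        · exact ⟨y, x, hy, hx, h2⟩
        · rw [if_neg h2] at hxne
          exact absurd rfl hxne
    obtain ⟨y', x', hy', hx', hsrc'⟩ := hsrc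
    have : ((x' : Int), (y' : Int), ((nxt W x' : Nat) : Int), ">") ∈ m1 grid :=
      (mem_m1 grid W hWd hrect _).mpr ⟨y', x', hy', hx', hsrc', rfl⟩
    exact List.length_pos_of_mem this

theorem moved2_eq (grid : List (List String)) (W : Nat) (hWd : wdt grid = (W : Int))
    (hrect : ∀ row ∈ grid, row.length = W) :
    decide (0 < (m2 grid).length) =
      ((eastG grid).zip (southG grid)).any (fun rn => decide (rn.2 ≠ rn.1)) := by
  have hEl : (eastG grid).length = grid.length := by simp [eastG]
  have hrectE := eastG_rect grid W hrect
  have hzl : ((eastG grid).zip (southG grid)).length = grid.length := by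
    simp [southG_length, hEl]
  rw [Bool.eq_iff_iff]
  simp only [decide_eq_true_eq, List.any_eq_true]
  constructor
  · intro h
    obtain ⟨t, ht⟩ := List.exists_mem_of_length_pos h
    obtain ⟨y, x, hy, hx, hsrc, _⟩ := (mem_m2 grid W hWd hrect t).mp ht
    have hyE : y < (eastG grid).length := by rw [hEl]; exact hy
    have hyS : y < (southG grid).length := by rw [southG_length]; exact hyE
    refine ⟨((eastG grid)[y], (southG grid)[y]),
      List.mem_iff_getElem.mpr ⟨y, by rw [hzl]; exact hy, by rw [List.getElem_zip]⟩, ?_⟩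
    intro he
    have hlen : (southG grid)[y].length = (eastG grid)[y].length :=
      southG_row_length grid y hyE
    have hcg := (row_eq_iff_cg (southG grid) (eastG grid) y hyS hyE hlen).mp he x
      (by rw [southG_row_length grid y hyE, hrectE _ (List.getElem_mem hyE)]; exact hx)
    rw [cg_southG grid W hrect y x hy hx] at hcg
    rw [if_neg (by intro hc; rw [hsrc.1] at hc; exact absurd hc.1 (by decide)),
      if_pos ⟨hsrc.1, hsrc.2⟩] at hcg
    rw [hsrc.1] at hcg
    exact absurd hcg (by decide)
  · rintro ⟨rn, hrn, hne⟩
    obtain ⟨y, hyz, rfl⟩ := List.mem_iff_getElem.mp hrn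
    rw [List.getElem_zip] at hne
    simp only at hne
    have hy : y < grid.length := by rw [← hzl]; exact hyz
    have hyE : y < (eastG grid).length := by rw [hEl]; exact hy
    have hyS : y < (southG grid).length := by rw [southG_length]; exact hyE
    have hlen : (southG grid)[y].length = (eastG grid)[y].length :=
      southG_row_length grid y hyE
    have hdiff : ¬ ∀ x, x < (southG grid)[y].length →
        cg (southG grid) y x = cg (eastG grid) y x := by
      intro hall
      exact hne ((row_eq_iff_cg (southG grid) (eastG grid) y hyS hyE hlen).mpr hall)
    push Not at hdiff
    obtain ⟨x, hxlen, hxne⟩ := hdiff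
    have hx : x < W := by
      rw [southG_row_length grid y hyE, hrectE _ (List.getElem_mem hyE)] at hxlen
      exact hxlen
    rw [cg_southG grid W hrect y x hy hx] at hxne
    have hsrc : ∃ y' x', y' < grid.length ∧ x' < W ∧ srcS (eastG grid) grid.length y' x' := by
      by_cases h1 : cg (eastG grid) y x = "." ∧ cg (eastG grid) (prv grid.length y) x = "v"
      · exact ⟨prv grid.length y, x, prv_lt (by omega), hx,
          ⟨h1.2, by rw [nxt_prv hy]; exact h1.1⟩⟩
      · rw [if_neg h1] at hxne
        by_cases h2 : cg (eastG grid) y x = "v" ∧ cg (eastG grid) (nxt grid.length y) x = "."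
        · exact ⟨y, x, hy, hx, h2⟩
        · rw [if_neg h2] at hxne
          exact absurd rfl hxne
    obtain ⟨y', x', hy', hx', hsrc'⟩ := hsrc
    have : ((x' : Int), (y' : Int), ((nxt grid.length y' : Nat) : Int), "v") ∈ m2 grid :=
      (mem_m2 grid W hWd hrect _).mpr ⟨y', x', hy', hx', hsrc', rfl⟩
    exact List.length_pos_of_mem this

-- the herd-free case: neither phase has a mover and every row is rebuilt unchanged
theorem pullEastRow_clean (row : List String)
    (h : ∀ c ∈ row, c ≠ "." ∧ c ≠ ">" ∧ c ≠ "v") : pullEastRow row = row := by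
  unfold pullEastRow
  conv_rhs => rw [← PySem.List.map_snd_enumerate row 0]
  apply List.map_congr_left
  intro xc hxc
  have h2 : xc.2 ∈ row := by
    obtain ⟨k, hk, rfl⟩ := (PySem.List.mem_enumerate_iff _ _ _).mp hxc
    exact List.getElem_mem hk
  obtain ⟨hd, hg, _⟩ := h xc.2 h2
  rw [if_neg (by intro hc; exact hd hc.1), if_neg (by intro hc; exact hg hc.1)]

theorem m1_clean (grid : List (List String))
    (h : ∀ row ∈ grid, ∀ c ∈ row, c ≠ "." ∧ c ≠ ">" ∧ c ≠ "v") : m1 grid = [] := by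
  rw [m1_eq]
  apply List.flatMap_eq_nil_iff.mpr
  intro yr hyr
  apply List.flatMap_eq_nil_iff.mpr
  intro xp hxp
  have hrow : yr.2 ∈ grid := by
    obtain ⟨k, hk, rfl⟩ := (PySem.List.mem_enumerate_iff _ _ _).mp hyr
    exact List.getElem_mem hk
  have h2 : xp.2 ∈ yr.2 := by
    obtain ⟨j, hj, rfl⟩ := (PySem.List.mem_enumerate_iff _ _ _).mp hxp
    exact List.getElem_mem hj
  rw [if_neg (by intro hc; exact (h yr.2 hrow xp.2 h2).2.1 hc.1)]

theorem gE_clean (grid : List (List String))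
    (h : ∀ row ∈ grid, ∀ c ∈ row, c ≠ "." ∧ c ≠ ">" ∧ c ≠ "v") : gE grid = grid := by
  rw [gE, m1_clean grid h]
  rfl

theorem m2_clean (grid : List (List String))
    (h : ∀ row ∈ grid, ∀ c ∈ row, c ≠ "." ∧ c ≠ ">" ∧ c ≠ "v") : m2 grid = [] := by
  rw [m2_flatMap, gE_clean grid h]
  apply List.flatMap_eq_nil_iff.mpr
  intro yr hyr
  apply List.flatMap_eq_nil_iff.mpr
  intro xp hxp
  have hrow : yr.2 ∈ grid := by
    obtain ⟨k, hk, rfl⟩ := (PySem.List.mem_enumerate_iff _ _ _).mp hyr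
    exact List.getElem_mem hk
  have h2 : xp.2 ∈ yr.2 := by
    obtain ⟨j, hj, rfl⟩ := (PySem.List.mem_enumerate_iff _ _ _).mp hxp
    exact List.getElem_mem hj
  rw [if_neg (by intro hc; exact (h yr.2 hrow xp.2 h2).2.2 hc.1)]

theorem eastG_clean (grid : List (List String))
    (h : ∀ row ∈ grid, ∀ c ∈ row, c ≠ "." ∧ c ≠ ">" ∧ c ≠ "v") : eastG grid = grid := by
  unfold eastG
  conv_rhs => rw [← List.map_id grid]
  apply List.map_congr_left
  intro row hrow
  rw [pullEastRow_clean row (h row hrow)]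
  rfl

theorem southG_clean (grid : List (List String))
    (h : ∀ row ∈ grid, ∀ c ∈ row, c ≠ "." ∧ c ≠ ">" ∧ c ≠ "v") : southG grid = grid := by
  unfold southG
  rw [eastG_clean grid h]
  conv_rhs => rw [← PySem.List.map_snd_enumerate grid 0]
  apply List.map_congr_left
  intro yr hyr
  have hrow : yr.2 ∈ grid := by
    obtain ⟨k, hk, rfl⟩ := (PySem.List.mem_enumerate_iff _ _ _).mp hyr
    exact List.getElem_mem hk
  conv_rhs => rw [← PySem.List.map_snd_enumerate yr.2 0]
  apply List.map_congr_left
  intro xc hxc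
  have h2 : xc.2 ∈ yr.2 := by
    obtain ⟨j, hj, rfl⟩ := (PySem.List.mem_enumerate_iff _ _ _).mp hxc
    exact List.getElem_mem hj
  obtain ⟨hd, _, hv⟩ := h yr.2 hrow xc.2 h2
  rw [if_neg (by intro hc; exact hd hc.1), if_neg (by intro hc; exact hv hc.1)]

theorem zip_self_any_ne (l : List (List String)) :
    (l.zip l).any (fun rn => decide (rn.2 ≠ rn.1)) = false := by
  rw [List.any_eq_false]
  intro rn hrn
  obtain ⟨y, hy, rfl⟩ := List.mem_iff_getElem.mp hrn
  rw [List.getElem_zip]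
  simp

-- ===== VERDICT (by name: the statement is the Claim_ definition above) =====
theorem stepGrid_spec : Claim_equal_stepGrid := by
  intro grid _ hpre
  unfold Spec_stepGrid
  obtain ⟨hne, hrect | hclean⟩ := hpre
  · have hWd : wdt grid = ((grid.headD []).length : Int) := by
      cases grid with
      | nil => exact absurd rfl hne
      | cons a l => simp [wdt]
    rw [stepGrid_eq, stepGrid_alt_eq]
    rw [moved1_eq grid (grid.headD []).length hWd hrect,
        moved2_eq grid (grid.headD []).length hWd hrect]
  · rw [stepGrid_eq, stepGrid_alt_eq, m1_clean grid hclean, m2_clean grid hclean,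
      eastG_clean grid hclean, southG_clean grid hclean, zip_self_any_ne]
    simp
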